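-- pv_equiv track=rewrite | github.com/bmareddy/leetcode | Python/950_reveal_cards_in_increasing_order.py | splitDeck
-- ===== SOURCE A (Python) =====
-- from functools import reduce
-- import math
--
-- def reduce_to_list(list1, list2):
--     zipped_lists = list(zip(list1,list2))
--     return list(reduce(lambda x, y: x + y, zipped_lists))
--
-- def splitDeck(deck):
--     if not deck:
--         return None
--     len_deck = len(deck)
--     if len_deck in (1,2):
--         return deck
--     deck_even = True if len_deck % 2 == 0 else False
--     idx = math.ceil(len_deck/2)
--
--     sorted_deck = sorted(deck)
--     left = sorted_deck[:idx]
--     right = sorted_deck[idx:] if deck_even else sorted_deck[idx-1:]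
--
--     split_right = splitDeck(right)
--     if deck_even:
--         return reduce_to_list(left, split_right)
--     output = reduce_to_list(left[:-1], split_right[1:])
--     output.append(left[-1])
--     return output
-- ===== SOURCE B (Python) =====
-- def splitDeck(deck):
--     if not deck:
--         return None
--     # Build the answer back to front: a deck reveals c, rest  iff  it is
--     # [c] + (deck revealing rest, with its last card rotated to the front).
--     res = []
--     for card in reversed(sorted(deck)):
--         if res:
--             res.insert(0, res.pop())
--         res.insert(0, card)
--     return res
-- ===== Notes on version B (the rewrite author's own statement) =====
-- stated objective: simpler
-- what changed: Replaces the recursive halving + zip/reduce interleaving with a single backward pass over the sorted deck that prepends each card after rotating the last card to the front (the inverse of one reveal step).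
-- intended difference: On two-card decks in decreasing order A's len==2 early return skips sorting and returns the deck as-is, which does not reveal in increasing order; B returns the sorted pair, the intended arrangement. — e.g. on splitDeck([2, 1]): A returns some [2, 1], B returns some [1, 2]
import Mathlib
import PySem

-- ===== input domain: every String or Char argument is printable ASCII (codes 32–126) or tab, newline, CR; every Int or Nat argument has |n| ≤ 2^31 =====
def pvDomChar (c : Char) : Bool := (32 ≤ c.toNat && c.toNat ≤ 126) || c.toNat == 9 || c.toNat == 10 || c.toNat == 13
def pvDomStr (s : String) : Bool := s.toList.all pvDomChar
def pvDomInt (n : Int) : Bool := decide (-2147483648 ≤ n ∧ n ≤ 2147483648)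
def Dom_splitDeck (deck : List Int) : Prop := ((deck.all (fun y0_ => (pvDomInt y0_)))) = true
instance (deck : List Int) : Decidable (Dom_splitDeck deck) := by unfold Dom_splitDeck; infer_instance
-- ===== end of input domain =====

-- B rebuilds the deck in ONE backward pass over the sorted cards (prepend after rotating
-- the last card to the front) instead of A's recursive halving + zip/reduce interleaving.
-- Return-value equivalence only; neither program mutates its argument.

-- ===== PORT A =====
-- reduce_to_list: list(reduce(lambda x, y: x + y, zip(list1, list2))).  The reduce
-- concatenates the zipped pairs into one flat tuple; value-exact as a fold that appends
-- both components of each pair (A only calls it with a nonempty zip, where reduce returns).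
def reduceToList (list1 list2 : List Int) : List Int :=
  (list1.zip list2).foldl (fun acc p => acc ++ [p.1, p.2]) []

def splitDeck (deck : List Int) : Option (List Int) :=
  if _h1 : deck = [] then none
  else
    let lenDeck := deck.length
    if _h2 : lenDeck = 1 ∨ lenDeck = 2 then some deck
    else
      let deckEven : Bool := lenDeck % 2 == 0
      let idx := (lenDeck + 1) / 2          -- math.ceil(len_deck/2); exact: len ≤ 2^31 keeps the float division exact enough for ceil
      let sortedDeck := PySem.List.sorted deck (fun x => x)
      let left := sortedDeck.take idx       -- sorted_deck[:idx]
      let right := if deckEven then sortedDeck.drop idx else sortedDeck.drop (idx - 1)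
      match splitDeck right with
      | none => none                        -- unreachable: right is nonempty, so the recursive call returns a list
      | some splitRight =>
        if deckEven then some (reduceToList left splitRight)
        else some (reduceToList left.dropLast splitRight.tail ++ [left.getLastD 0])
          -- left[:-1] = dropLast, split_right[1:] = tail, output.append(left[-1]); left ≠ [] here, so the default of getLastD is unused
termination_by deck.length
decreasing_by
  have h0 : deck.length ≠ 0 := by simpa using _h1
  have h3 : ¬(deck.length = 1 ∨ deck.length = 2) := _h2
  split <;> simp only [List.length_drop, PySem.List.length_sorted] <;> omega

-- ===== PORT B =====
-- res.insert(0, res.pop()) — rotate the last element to the front (B only calls it on nonempty res)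
def rotateLastToFront (res : List Int) : List Int := res.getLastD 0 :: res.dropLast

def splitDeck_alt (deck : List Int) : Option (List Int) :=
  if deck = [] then none
  else some (((PySem.List.sorted deck (fun x => x)).reverse).foldl
      (fun res card => card :: (if res = [] then res else rotateLastToFront res)) [])

-- ===== PRECONDITION & SPEC =====
-- On two-card decks in decreasing order A's len==2 early return skips sorting and returns the
-- deck as-is, which does not reveal in increasing order; B returns the sorted pair, the intended arrangement.
def D_splitDeck (deck : List Int) : Prop := deck.length = 2 ∧ deck.getLastD 0 < deck.headI
instance (deck : List Int) : Decidable (D_splitDeck deck) := by unfold D_splitDeck; infer_instance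

def Spec_splitDeck (deck : List Int) (out : Option (List Int)) : Prop := ¬ D_splitDeck deck → out = splitDeck_alt deck
instance (deck : List Int) (out : Option (List Int)) : Decidable (Spec_splitDeck deck out) := by unfold Spec_splitDeck; infer_instance

def pvDiffWitness_splitDeck : List Int := [2, 1]
def pvDiffWitnessOut_splitDeck : (Option (List Int)) × (Option (List Int)) := (some [2, 1], some [1, 2])

-- ===== CLAIM (what is proved, stated in full; the proofs are below) =====
def Claim_unchanged_splitDeck : Prop := ∀ (deck : List Int), Dom_splitDeck deck → Spec_splitDeck deck (splitDeck deck)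
def Claim_changed_splitDeck : Prop := Dom_splitDeck (pvDiffWitness_splitDeck) ∧ D_splitDeck (pvDiffWitness_splitDeck) ∧ splitDeck (pvDiffWitness_splitDeck) = pvDiffWitnessOut_splitDeck.1 ∧ splitDeck_alt (pvDiffWitness_splitDeck) = pvDiffWitnessOut_splitDeck.2 ∧ pvDiffWitnessOut_splitDeck.1 ≠ pvDiffWitnessOut_splitDeck.2
def Claim_exact_splitDeck : Prop := ∀ (deck : List Int), Dom_splitDeck deck → D_splitDeck deck → splitDeck deck ≠ splitDeck_alt deck

-- ===== LEMMAS AND PROOFS =====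

-- the common characterization: B's loop body folded from the right over the ascending sorted deck
def gfun (l : List Int) : List Int :=
  l.foldr (fun card res => card :: (if res = [] then res else rotateLastToFront res)) []

theorem gfun_cons (c : Int) (t : List Int) :
    gfun (c :: t) = c :: (if gfun t = [] then gfun t else rotateLastToFront (gfun t)) := rfl

theorem length_gfun (l : List Int) : (gfun l).length = l.length := by
  induction l with
  | nil => rfl
  | cons c t ih =>
    rw [gfun_cons]
    split_ifs with h
    · simp [List.length_cons, ih]
    · have hpos : 0 < (gfun t).length := List.length_pos_iff.mpr h
      simp only [rotateLastToFront, List.length_cons, List.length_dropLast, ih] at *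
      omega

theorem gfun_eq_nil_iff (l : List Int) : gfun l = [] ↔ l = [] := by
  rw [← List.length_eq_zero_iff, ← List.length_eq_zero_iff, length_gfun]

theorem gfun_small (l : List Int) (h : l.length ≤ 2) : gfun l = l := by
  rcases l with _ | ⟨a, _ | ⟨b, _ | ⟨c, t⟩⟩⟩
  · rfl
  · rfl
  · simp [gfun, rotateLastToFront]
  · simp at h

-- interleave of two lists, keeping the remainder of the FIRST list
def itl : List Int → List Int → List Int
  | [], _ => []
  | x :: xs, [] => x :: xs
  | x :: xs, y :: ys => x :: y :: itl xs ys

theorem reduceToList_eq_itl (l1 l2 : List Int) (h : l1.length = l2.length) :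
    reduceToList l1 l2 = itl l1 l2 := by
  induction l1 generalizing l2 with
  | nil =>
    rcases l2 with _ | _
    · rfl
    · simp at h
  | cons x xs ih =>
    rcases l2 with _ | ⟨y, ys⟩
    · simp at h
    · simp only [List.length_cons, Nat.add_right_cancel_iff] at h
      have hthis := ih ys h
      rw [reduceToList, PySem.List.foldl_append_eq_flatMap (fun p : Int × Int => [p.1, p.2]) (xs.zip ys) [],
          List.nil_append] at hthis
      rw [reduceToList, List.zip_cons_cons, List.foldl_cons,
          PySem.List.foldl_append_eq_flatMap (fun p : Int × Int => [p.1, p.2]), hthis]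
      rfl

theorem rot_append_singleton (I : List Int) (z : Int) :
    rotateLastToFront (I ++ [z]) = z :: I := by
  simp [rotateLastToFront]

theorem rot_itl (Y X : List Int) (hl : X.length = Y.length) (hY : Y ≠ []) :
    rotateLastToFront (itl X Y) = Y.getLastD 0 :: itl X Y.dropLast := by
  induction Y generalizing X with
  | nil => exact absurd rfl hY
  | cons y ys ih =>
    rcases X with _ | ⟨x, xs⟩
    · simp at hl
    · simp only [List.length_cons, Nat.add_right_cancel_iff] at hl
      rcases ys with _ | ⟨y', ys'⟩
      · have hxs : xs = [] := List.length_eq_zero_iff.mp hl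
        subst hxs
        simp [itl, rotateLastToFront]
      · rcases xs with _ | ⟨x', xs'⟩
        · simp at hl
        · have hIH := ih (x' :: xs') hl (by simp)
          have hL : itl (x' :: xs') (y' :: ys') ≠ [] := by
            rcases ys' with _ | _ <;> simp [itl]
          obtain ⟨I, z, hIz⟩ : ∃ I z, itl (x' :: xs') (y' :: ys') = I ++ [z] := by
            rcases (itl (x' :: xs') (y' :: ys')).eq_nil_or_concat with h | ⟨I, z, h⟩
            · exact absurd h hL
            · exact ⟨I, z, by simpa [List.concat_eq_append] using h⟩
          rw [hIz, rot_append_singleton] at hIH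
          have hz : (y' :: ys').getLastD 0 = z := by
            have := congrArg List.head? hIH
            simpa using this.symm
          have hI : itl (x' :: xs') ((y' :: ys').dropLast) = I := by
            have := congrArg List.tail hIH
            simpa using this.symm
          show rotateLastToFront (x :: y :: itl (x' :: xs') (y' :: ys')) = _
          rw [hIz]
          show rotateLastToFront ((x :: y :: I) ++ [z]) = _
          rw [rot_append_singleton]
          show z :: x :: y :: I = (y' :: ys').getLastD 0 :: itl (x :: x' :: xs') (y :: (y' :: ys').dropLast)
          rw [hz]
          show _ = z :: x :: y :: itl (x' :: xs') ((y' :: ys').dropLast)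
          rw [hI]

theorem itl_append_last (X Z : List Int) (h : X.length = Z.length + 1) :
    itl X Z = itl X.dropLast Z ++ [X.getLastD 0] := by
  induction Z generalizing X with
  | nil =>
    rcases X with _ | ⟨x, _ | _⟩
    · simp at h
    · rfl
    · simp at h
  | cons z zs ih =>
    rcases X with _ | ⟨x, xs⟩
    · simp at h
    · simp only [List.length_cons, Nat.add_right_cancel_iff] at h
      have hxs : xs ≠ [] := by rintro rfl; simp at h
      rcases List.exists_cons_of_ne_nil hxs with ⟨x', xs', rfl⟩
      show x :: z :: itl (x' :: xs') zs = itl ((x :: x' :: xs').dropLast) (z :: zs) ++ [(x :: x' :: xs').getLastD 0]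
      rw [ih _ h]
      simp [itl, List.dropLast_cons_of_ne_nil]

theorem getLastD_take (l : List Int) (m : Nat) (h1 : m ≠ 0) (h2 : m ≤ l.length) :
    (l.take m).getLastD 0 = l.getD (m - 1) 0 := by
  rw [List.getLastD_eq_getLast?, List.getLast?_take, if_neg h1]
  have h3 : l[m-1]? = some (l[m-1]'(by omega)) := List.getElem?_eq_getElem (by omega)
  rw [List.getD_eq_getElem?_getD, h3]
  rfl

-- joint even/odd halving characterization of gfun
theorem gfun_halves (n : Nat) : ∀ s : List Int, s.length = n →
    (∀ m, n = 2 * m → gfun s = itl (s.take m) (gfun (s.drop m))) ∧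
    (∀ m, n = 2 * m + 1 →
      gfun s = itl (s.take m) ((gfun (s.drop m)).tail) ++ [s.getD m 0]) := by
  induction n using Nat.strong_induction_on with
  | _ n ih =>
  intro s hs
  constructor
  · -- even half
    intro m hm
    rcases s with _ | ⟨a, s'⟩
    · simp [gfun, itl]
    · simp only [List.length_cons] at hs
      obtain ⟨m', rfl⟩ : ∃ m', m = m' + 1 := ⟨m - 1, by omega⟩
      have hs' : s'.length = 2 * m' + 1 := by omega
      have hodd := (ih (n - 1) (by omega) s' (by omega)).2 m' (by omega)
      have hne : gfun s' ≠ [] := by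
        intro hh; rw [gfun_eq_nil_iff] at hh; rw [hh] at hs'; simp at hs'
      have hdropcons : s'.drop m' = s'.getD m' 0 :: s'.drop (m' + 1) := by
        rw [List.drop_eq_getElem_cons (by omega), List.getD_eq_getElem?_getD,
            List.getElem?_eq_getElem (by omega)]
        rfl
      obtain ⟨t, hW⟩ : ∃ t, gfun (s'.drop m') = s'.getD m' 0 :: t :=
        ⟨_, by rw [hdropcons, gfun_cons]⟩
      have htail : (gfun (s'.drop m')).tail = t := by rw [hW]; rfl
      rw [List.take_succ_cons, List.drop_succ_cons, hW, itl, gfun_cons, if_neg hne, hodd,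
          rot_append_singleton, htail]
  · -- odd half
    intro m hm
    rcases s with _ | ⟨a, s'⟩
    · simp at hs; omega
    · simp only [List.length_cons] at hs
      rcases m with _ | m'
      · -- m = 0 : s = [a]
        have hs0 : s' = [] := by
          have : s'.length = 0 := by omega
          exact List.length_eq_zero_iff.mp this
        subst hs0
        simp [gfun, itl]
      · have hs' : s'.length = 2 * m' + 2 := by omega
        have heven := (ih (n - 1) (by omega) s' (by omega)).1 (m' + 1) (by omega)
        have hne : gfun s' ≠ [] := by
          intro hh; rw [gfun_eq_nil_iff] at hh; rw [hh] at hs'; simp at hs'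
        have hXlen : (s'.take (m' + 1)).length = m' + 1 := by
          rw [List.length_take]; omega
        have hYlen : (gfun (s'.drop (m' + 1))).length = m' + 1 := by
          rw [length_gfun, List.length_drop]; omega
        have hYne : gfun (s'.drop (m' + 1)) ≠ [] := by
          intro hh; rw [hh] at hYlen; simp at hYlen
        have hdropcons : s'.drop m' = s'.getD m' 0 :: s'.drop (m' + 1) := by
          rw [List.drop_eq_getElem_cons (by omega), List.getD_eq_getElem?_getD,
            List.getElem?_eq_getElem (by omega)]
          rfl
        have htail : (gfun (s'.drop m')).tail = rotateLastToFront (gfun (s'.drop (m' + 1))) := by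
          rw [hdropcons, gfun_cons, if_neg hYne]
          rfl
        have hXdl : (s'.take (m' + 1)).dropLast = s'.take m' := by
          have hh := List.dropLast_take (l := s') (i := m' + 1) (by omega)
          simpa using hh
        have hXlast : (s'.take (m' + 1)).getLastD 0 = s'.getD m' 0 := by
          have hh := getLastD_take s' (m' + 1) (by omega) (by omega)
          simpa using hh
        -- LHS
        rw [gfun_cons, if_neg hne, heven,
            rot_itl _ _ (by rw [hXlen, hYlen]) hYne,
            itl_append_last _ _ (by rw [hXlen, List.length_dropLast, hYlen]; omega),
            hXdl, hXlast]
        -- RHS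
        rw [List.take_succ_cons, List.drop_succ_cons, htail, List.getD_cons_succ]
        show a :: _ :: (itl _ _ ++ _) = itl (a :: s'.take m')
            ((gfun (s'.drop (m' + 1))).getLastD 0 :: (gfun (s'.drop (m' + 1))).dropLast) ++ _
        rw [itl]
        rfl

theorem A_small (deck : List Int) (h0 : deck ≠ []) (h : deck.length ≤ 2) :
    splitDeck deck = some deck := by
  have h12 : deck.length = 1 ∨ deck.length = 2 := by
    have : deck.length ≠ 0 := by simpa using h0
    omega
  rw [splitDeck]
  simp only [dif_neg h0, dif_pos h12]

theorem A_big_aux (n : Nat) : ∀ deck : List Int, deck.length = n → 3 ≤ n →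
    splitDeck deck = some (gfun (PySem.List.sorted deck (fun x => x))) := by
  induction n using Nat.strong_induction_on with
  | _ n ih =>
  intro deck hlen h3
  have h0 : deck ≠ [] := by
    intro hh; rw [hh] at hlen; simp at hlen; omega
  have h12 : ¬(deck.length = 1 ∨ deck.length = 2) := by omega
  have hslen : (PySem.List.sorted deck (fun x => x)).length = n := by
    rw [PySem.List.length_sorted, hlen]
  have hpair : (PySem.List.sorted deck (fun x => x)).Pairwise (fun a b => a ≤ b) :=
    PySem.List.sorted_pairwise deck (fun x => x)
  have hrec : ∀ r : List Int, r.Pairwise (fun a b : Int => a ≤ b) → r ≠ [] →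
      r.length < n → splitDeck r = some (gfun r) := by
    intro r hp hne hlt
    rcases Nat.lt_or_ge 2 r.length with h | h
    · rw [ih r.length hlt r rfl (by omega),
          PySem.List.sorted_eq_self_of_pairwise r (fun x => x) hp]
    · rw [A_small r hne h, gfun_small r h]
  rw [splitDeck]
  simp only [dif_neg h0, dif_neg h12]
  rw [hlen]
  by_cases hev : n % 2 = 0
  · have hbev : (n % 2 == 0) = true := by simpa using hev
    simp only [hbev, if_true]
    have hrlen : (List.drop ((n + 1) / 2) (PySem.List.sorted deck fun x => x)).length
        = n - (n + 1) / 2 := by simp [hslen]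
    rw [hrec (List.drop ((n + 1) / 2) (PySem.List.sorted deck fun x => x))
          (List.Pairwise.sublist (List.drop_sublist _ _) hpair)
          (by intro hh; rw [hh] at hrlen; simp at hrlen; omega)
          (by omega)]
    show some (reduceToList _ _) = _
    rw [reduceToList_eq_itl _ _
          (by simp only [List.length_take, length_gfun, hrlen, hslen]; omega)]
    exact congrArg some ((gfun_halves n _ hslen).1 ((n + 1) / 2) (by omega)).symm
  · have hbev : (n % 2 == 0) = false := by simpa using hev
    simp only [hbev, Bool.false_eq_true, if_false]
    have hrlen : (List.drop ((n + 1) / 2 - 1) (PySem.List.sorted deck fun x => x)).length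
        = n - ((n + 1) / 2 - 1) := by simp [hslen]
    rw [hrec (List.drop ((n + 1) / 2 - 1) (PySem.List.sorted deck fun x => x))
          (List.Pairwise.sublist (List.drop_sublist _ _) hpair)
          (by intro hh; rw [hh] at hrlen; simp at hrlen; omega)
          (by omega)]
    show some (reduceToList _ _ ++ _) = _
    have hXdl : (List.take ((n + 1) / 2) (PySem.List.sorted deck fun x => x)).dropLast
        = List.take ((n + 1) / 2 - 1) (PySem.List.sorted deck fun x => x) :=
      List.dropLast_take (by omega)
    have hXlast : (List.take ((n + 1) / 2) (PySem.List.sorted deck fun x => x)).getLastD 0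
        = (PySem.List.sorted deck fun x => x).getD ((n + 1) / 2 - 1) 0 :=
      getLastD_take _ _ (by omega) (by omega)
    rw [hXdl, hXlast,
        reduceToList_eq_itl _ _
          (by simp only [List.length_take, List.length_tail, length_gfun, hrlen, hslen]; omega)]
    exact congrArg some ((gfun_halves n _ hslen).2 ((n + 1) / 2 - 1) (by omega)).symm

theorem A_big (deck : List Int) (h : 3 ≤ deck.length) :
    splitDeck deck = some (gfun (PySem.List.sorted deck (fun x => x))) :=
  A_big_aux deck.length deck rfl h

theorem B_eq (deck : List Int) (h : deck ≠ []) :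
    splitDeck_alt deck = some (gfun (PySem.List.sorted deck (fun x => x))) := by
  rw [splitDeck_alt, if_neg h]
  congr 1
  rw [List.foldl_reverse]
  rfl

theorem sorted_pair_le (a b : Int) (hab : a ≤ b) :
    PySem.List.sorted [a, b] (fun x => x) = [a, b] :=
  PySem.List.sorted_eq_self_of_pairwise [a, b] (fun x => x) (by simp [hab])

-- ===== VERDICT (by name: the statement is the Claim_ definition above) =====
theorem splitDeck_spec : Claim_unchanged_splitDeck := by
  intro deck _ hnd
  show splitDeck deck = splitDeck_alt deck
  rcases deck with _ | ⟨a, _ | ⟨b, _ | ⟨c, t⟩⟩⟩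
  · rw [splitDeck, splitDeck_alt]
    simp
  · rw [A_small [a] (by simp) (by simp), B_eq [a] (by simp)]
    rw [PySem.List.sorted_eq_self_of_pairwise [a] (fun x => x) (by simp)]
    rw [gfun_small [a] (by simp)]
  · have hab : a ≤ b := by
      simp only [D_splitDeck, List.length_cons, List.length_nil, List.getLastD_cons,
        List.getLastD_nil, List.headI_cons, not_and] at hnd
      have := hnd trivial
      omega
    rw [A_small [a, b] (by simp) (by simp), B_eq [a, b] (by simp)]
    rw [sorted_pair_le a b hab, gfun_small [a, b] (by simp)]
  · rw [A_big (a :: b :: c :: t) (by simp), B_eq (a :: b :: c :: t) (by simp)]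

theorem splitDeck_changed : Claim_changed_splitDeck := by
  unfold Claim_changed_splitDeck
  refine ⟨by decide, by decide, ?_, by decide, by decide⟩
  exact A_small pvDiffWitness_splitDeck (by decide) (by decide)

theorem splitDeck_tight : Claim_exact_splitDeck := by
  intro deck _ hd
  obtain ⟨hl, hab⟩ := hd
  rcases deck with _ | ⟨a, _ | ⟨b, _ | ⟨c, t⟩⟩⟩ <;> simp at hl
  simp only [List.getLastD_cons, List.getLastD_nil, List.headI_cons] at hab
  rw [A_small [a, b] (by simp) (by simp), B_eq [a, b] (by simp)]
  rw [PySem.List.sorted_eq_of_perm_of_pairwise_lt [a, b] [b, a] (fun x => x)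
        (List.Perm.swap a b []) (by simp [hab])]
  rw [gfun_small [b, a] (by simp)]
  intro heq
  simp only [Option.some.injEq, List.cons.injEq] at heq
  omega
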